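-- pv_equiv track=rewrite | github.com/seryrzu/centroFlye | scripts/tandem_read_recruiter.py | get_convolution
-- ===== SOURCE A (Python) =====
-- def get_convolution(rep_kmers):
--     conv, union_conv = {}, []
--     for kmer in rep_kmers:
--         pos = rep_kmers[kmer]
--         conv[kmer] = sorted(y - x for x, y in zip(pos[:-1], pos[1:]))
--         union_conv += conv[kmer]
--     union_conv.sort()
--     return conv, union_conv
-- ===== SOURCE B (Python) =====
-- def _merge(xs, ys):
--     out = []
--     i = j = 0
--     while i < len(xs) and j < len(ys):
--         if xs[i] <= ys[j]:
--             out.append(xs[i]); i += 1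
--         else:
--             out.append(ys[j]); j += 1
--     out.extend(xs[i:])
--     out.extend(ys[j:])
--     return out
--
--
-- def get_convolution(rep_kmers):
--     conv = {k: sorted(b - a for a, b in zip(pos, pos[1:]))
--             for k, pos in rep_kmers.items()}
--     runs = list(conv.values())
--     if not runs:
--         return conv, []
--     while len(runs) > 1:
--         runs = [_merge(runs[i], runs[i + 1]) if i + 1 < len(runs) else runs[i]
--                 for i in range(0, len(runs), 2)]
--     return conv, runs[0]
-- ===== Notes on version B (the rewrite author's own statement) =====
-- stated objective: alternative
-- what changed: B builds conv by a dict comprehension over items and builds the union by repeatedly merging adjacent pairs of the already-sorted per-kmer difference lists (balanced merge of sorted runs), instead of A's key-iteration with lookup, concatenation and a final comparison sort.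
import Mathlib
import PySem

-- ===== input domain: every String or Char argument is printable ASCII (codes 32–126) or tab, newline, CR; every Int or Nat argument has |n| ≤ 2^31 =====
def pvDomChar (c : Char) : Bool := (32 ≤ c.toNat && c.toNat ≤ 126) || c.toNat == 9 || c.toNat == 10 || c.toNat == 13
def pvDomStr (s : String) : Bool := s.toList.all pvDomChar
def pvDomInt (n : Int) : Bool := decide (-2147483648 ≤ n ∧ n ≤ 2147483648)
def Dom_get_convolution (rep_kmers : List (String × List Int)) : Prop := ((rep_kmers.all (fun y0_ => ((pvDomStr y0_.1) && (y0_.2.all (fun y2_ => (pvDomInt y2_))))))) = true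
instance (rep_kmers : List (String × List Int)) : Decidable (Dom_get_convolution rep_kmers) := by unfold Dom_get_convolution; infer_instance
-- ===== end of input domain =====

-- B replaces A's concatenate-then-sort union by an iterative merge of the already-sorted
-- per-kmer difference lists, and builds conv by a comprehension over items (objective: alternative).

-- ===== PORT A =====
-- for kmer in rep_kmers: pos = rep_kmers[kmer]; conv[kmer] = sorted(y-x for x,y in zip(pos[:-1],pos[1:])); union += conv[kmer]
def get_convolution (rep_kmers : List (String × List Int)) : (List (String × List Int)) × List Int :=
  let d := PySem.Dict.ofList rep_kmers
  let st := rep_kmers.foldl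
    (fun (st : PySem.Dict String (List Int) × List Int) kv =>
      let pos := PySem.Dict.getD d kv.1 []
      let c := PySem.List.sorted
        (List.zipWith (fun x y => y - x)
          (PySem.List.slice pos none (some (-1))) (PySem.List.slice pos (some 1) none))
        (fun v => v) false
      (st.1.insert kv.1 c, st.2 ++ c))
    (PySem.Dict.empty, [])
  (st.1.items, PySem.List.sorted st.2 (fun v => v) false)

-- ===== PORT B =====
-- two-pointer merge of two sorted lists (Source B _merge), as structural recursion
def mergeSorted : List Int → List Int → List Int
  | [], ys => ys
  | x :: xs, [] => x :: xs
  | x :: xs, y :: ys =>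
    if x ≤ y then x :: mergeSorted xs (y :: ys) else y :: mergeSorted (x :: xs) ys

-- one round: merge adjacent pairs of runs (the list comprehension over range(0, len, 2))
def mergePairs : List (List Int) → List (List Int)
  | a :: b :: rest => mergeSorted a b :: mergePairs rest
  | l => l

theorem mergePairs_length_le : ∀ l : List (List Int), (mergePairs l).length ≤ l.length := by
  intro l
  fun_induction mergePairs l with
  | case1 a b rest ih => simpa using Nat.le_trans ih (by omega)
  | case2 l _ => exact Nat.le_refl _

-- the while loop: repeat rounds until one run is left (runs[0]); [] gives []
def mergeRounds (runs : List (List Int)) : List Int :=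
  match runs with
  | [] => []
  | [r] => r
  | a :: b :: rest => mergeRounds (mergePairs (a :: b :: rest))
termination_by runs.length
decreasing_by
  have := mergePairs_length_le rest
  simp [mergePairs]; omega

def get_convolution_alt (rep_kmers : List (String × List Int)) : (List (String × List Int)) × List Int :=
  let conv := rep_kmers.map (fun kv =>
    (kv.1, PySem.List.sorted (List.zipWith (fun a b => b - a) kv.2 kv.2.tail) (fun v => v) false))
  (conv, mergeRounds (conv.map Prod.snd))

-- ===== PRECONDITION & SPEC =====
-- Pre_ requires distinct keys: A's parameter is a Python dict, which cannot hold duplicate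
-- keys, so association lists with repeated keys have no Python counterpart.
def Pre_get_convolution (rep_kmers : List (String × List Int)) : Prop :=
  (rep_kmers.map Prod.fst).Nodup
instance (rep_kmers : List (String × List Int)) : Decidable (Pre_get_convolution rep_kmers) := by unfold Pre_get_convolution; infer_instance

def pvWitness_get_convolution : (List (String × List Int)) := [("x", [5, 1, 4]), ("y", [2, 2])]

def Spec_get_convolution (rep_kmers : List (String × List Int)) (out : (List (String × List Int)) × List Int) : Prop := out = get_convolution_alt rep_kmers
instance (rep_kmers : List (String × List Int)) (out : (List (String × List Int)) × List Int) : Decidable (Spec_get_convolution rep_kmers out) := by unfold Spec_get_convolution; infer_instance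

-- ===== CLAIM (what is proved, stated in full; the proofs are below) =====
def Claim_equal_get_convolution : Prop := ∀ (rep_kmers : List (String × List Int)), Dom_get_convolution rep_kmers → Pre_get_convolution rep_kmers → Spec_get_convolution rep_kmers (get_convolution rep_kmers)

-- ===== LEMMAS AND PROOFS =====

-- zip(pos[:-1], pos[1:]) = zip(pos, pos[1:]) (zip truncates to the shorter list)
theorem zipWith_dropLast_tail (f : Int → Int → Int) :
    ∀ l : List Int, List.zipWith f l.dropLast l.tail = List.zipWith f l l.tail := by
  intro l
  induction l with
  | nil => rfl
  | cons x xs ih =>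
    cases xs with
    | nil => rfl
    | cons y ys =>
      simp only [List.dropLast_cons₂, List.tail_cons, List.zipWith_cons_cons] at *
      exact congrArg _ ih

def diffsOf (pos : List Int) : List Int :=
  PySem.List.sorted (List.zipWith (fun a b => b - a) pos pos.tail) (fun v => v) false

theorem foldl_pair {α β γ : Type} (f : α → γ → α) (g : β → γ → β) :
    ∀ (l : List γ) (a : α) (b : β),
      l.foldl (fun st x => (f st.1 x, g st.2 x)) (a, b) = (l.foldl f a, l.foldl g b) := by
  intro l
  induction l with
  | nil => intro a b; rfl
  | cons x xs ih => intro a b; simpa using ih (f a x) (g b x)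

theorem mergeSorted_perm : ∀ xs ys : List Int, (mergeSorted xs ys).Perm (xs ++ ys) := by
  intro xs ys
  fun_induction mergeSorted xs ys with
  | case1 ys => simp
  | case2 x xs => simp
  | case3 x xs y ys h ih => simpa using ih.cons x
  | case4 x xs y ys h ih =>
    exact (ih.cons y).trans List.perm_middle.symm

theorem mergeSorted_pairwise : ∀ xs ys : List Int,
    xs.Pairwise (· ≤ ·) → ys.Pairwise (· ≤ ·) → (mergeSorted xs ys).Pairwise (· ≤ ·) := by
  intro xs ys
  fun_induction mergeSorted xs ys with
  | case1 ys => intro _ h; exact h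
  | case2 x xs => intro h _; exact h
  | case3 x xs y ys h ih =>
    intro hx hy
    refine List.pairwise_cons.2 ⟨?_, ih (List.pairwise_cons.1 hx).2 hy⟩
    intro z hz
    have := (mergeSorted_perm xs (y :: ys)).mem_iff.1 hz
    rcases List.mem_append.1 this with h1 | h1
    · exact (List.pairwise_cons.1 hx).1 z h1
    · rcases List.mem_cons.1 h1 with rfl | h2
      · exact h
      · exact le_trans h ((List.pairwise_cons.1 hy).1 z h2)
  | case4 x xs y ys h ih =>
    intro hx hy
    have hyx : y ≤ x := le_of_lt (lt_of_not_ge h)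
    refine List.pairwise_cons.2 ⟨?_, ih hx (List.pairwise_cons.1 hy).2⟩
    intro z hz
    have := (mergeSorted_perm (x :: xs) ys).mem_iff.1 hz
    rcases List.mem_append.1 this with h1 | h1
    · rcases List.mem_cons.1 h1 with rfl | h2
      · exact hyx
      · exact le_trans hyx ((List.pairwise_cons.1 hx).1 z h2)
    · exact (List.pairwise_cons.1 hy).1 z h1

theorem mergePairs_flatten_perm : ∀ L : List (List Int), (mergePairs L).flatten.Perm L.flatten := by
  intro L
  fun_induction mergePairs L with
  | case1 a b rest ih =>
    simp only [List.flatten_cons]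
    exact (((mergeSorted_perm a b).append_right _).trans ((ih.append_left _))).trans (by simp)
  | case2 l _ => exact List.Perm.refl _

theorem mergePairs_pairwise (L : List (List Int)) (hL : ∀ ds ∈ L, ds.Pairwise (· ≤ ·)) :
    ∀ ds ∈ mergePairs L, ds.Pairwise (· ≤ ·) := by
  fun_induction mergePairs L with
  | case1 a b rest ih =>
    intro ds hds
    rcases List.mem_cons.1 hds with rfl | hds
    · exact mergeSorted_pairwise a b (hL a (by simp)) (hL b (by simp))
    · exact ih (fun d hd => hL d (by simp [hd])) ds hds
  | case2 l _ => exact hL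

theorem mergeRounds_perm : ∀ L : List (List Int), (mergeRounds L).Perm L.flatten := by
  intro L
  fun_induction mergeRounds L with
  | case1 => simp
  | case2 r => simp
  | case3 a b rest ih => exact ih.trans (mergePairs_flatten_perm _)

theorem mergeRounds_pairwise : ∀ L : List (List Int), (∀ ds ∈ L, ds.Pairwise (· ≤ ·)) →
    (mergeRounds L).Pairwise (· ≤ ·) := by
  intro L
  fun_induction mergeRounds L with
  | case1 => intro _; simp
  | case2 r => intro h; exact h r (by simp)
  | case3 a b rest ih => intro h; exact ih (mergePairs_pairwise _ h)

theorem diffsOf_pairwise (pos : List Int) : (diffsOf pos).Pairwise (· ≤ ·) := by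
  simpa using PySem.List.sorted_pairwise (List.zipWith (fun a b => b - a) pos pos.tail) (fun v => v)

-- ===== VERDICT (by name: the statement is the Claim_ definition above) =====
theorem get_convolution_spec : Claim_equal_get_convolution := by
  intro rep_kmers _ hpre
  unfold Spec_get_convolution get_convolution get_convolution_alt
  dsimp only
  have hnodup : (rep_kmers.map Prod.fst).Nodup := hpre
  have hitems : (PySem.Dict.ofList rep_kmers).items = rep_kmers := by
    have := PySem.Dict.items_foldl_insert_fresh rep_kmers Prod.fst Prod.snd PySem.Dict.empty
      (by simp [PySem.Dict.contains_empty]) hnodup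
    simpa [PySem.Dict.ofList] using this
  have hlook : ∀ kv ∈ rep_kmers,
      PySem.Dict.getD (PySem.Dict.ofList rep_kmers) kv.1 [] = kv.2 := by
    intro kv hkv
    exact PySem.Dict.getD_of_mem_items (d := PySem.Dict.ofList rep_kmers)
      (by rw [hitems]; exact hkv)
      (by simp only [PySem.Dict.keys, hitems]; exact hnodup) []
  -- normalise A's loop body to use the pair's own value and diffsOf
  have hbody : rep_kmers.foldl
      (fun (st : PySem.Dict String (List Int) × List Int) kv =>
        (st.1.insert kv.1 (PySem.List.sorted
          (List.zipWith (fun x y => y - x)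
            (PySem.List.slice (PySem.Dict.getD (PySem.Dict.ofList rep_kmers) kv.1 []) none (some (-1)))
            (PySem.List.slice (PySem.Dict.getD (PySem.Dict.ofList rep_kmers) kv.1 []) (some 1) none))
          (fun v => v) false),
         st.2 ++ PySem.List.sorted
          (List.zipWith (fun x y => y - x)
            (PySem.List.slice (PySem.Dict.getD (PySem.Dict.ofList rep_kmers) kv.1 []) none (some (-1)))
            (PySem.List.slice (PySem.Dict.getD (PySem.Dict.ofList rep_kmers) kv.1 []) (some 1) none))
          (fun v => v) false))
      (PySem.Dict.empty, []) =
      rep_kmers.foldl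
        (fun (st : PySem.Dict String (List Int) × List Int) kv =>
          (st.1.insert kv.1 (diffsOf kv.2), st.2 ++ diffsOf kv.2))
        (PySem.Dict.empty, []) := by
    apply PySem.List.foldl_congr_mem
    intro acc kv hkv
    simp only [hlook kv hkv, PySem.List.slice_to_neg_one, PySem.List.slice_from_one,
      zipWith_dropLast_tail, diffsOf]
  have hsplit := foldl_pair
      (fun (d : PySem.Dict String (List Int)) (kv : String × List Int) => d.insert kv.1 (diffsOf kv.2))
      (fun (u : List Int) (kv : String × List Int) => u ++ diffsOf kv.2)
      rep_kmers PySem.Dict.empty []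
  rw [hbody, hsplit]
  have hdict : (rep_kmers.foldl
      (fun (d : PySem.Dict String (List Int)) kv => d.insert kv.1 (diffsOf kv.2))
      PySem.Dict.empty).items = rep_kmers.map (fun kv => (kv.1, diffsOf kv.2)) := by
    have := PySem.Dict.items_foldl_insert_fresh rep_kmers Prod.fst
      (fun kv => diffsOf kv.2) PySem.Dict.empty (by simp [PySem.Dict.contains_empty]) hnodup
    simpa using this
  have hflat : rep_kmers.foldl (fun (u : List Int) kv => u ++ diffsOf kv.2) [] =
      rep_kmers.flatMap (fun kv => diffsOf kv.2) := by
    simpa using PySem.List.foldl_append_eq_flatMap (fun kv : String × List Int => diffsOf kv.2)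
      (acc := []) (l := rep_kmers)
  have hmapsnd : (rep_kmers.map (fun kv =>
      (kv.1, PySem.List.sorted (List.zipWith (fun a b => b - a) kv.2 kv.2.tail) (fun v => v) false))).map
        Prod.snd = rep_kmers.map (fun kv => diffsOf kv.2) := by
    simp [diffsOf]
  have hperm : (mergeRounds (rep_kmers.map (fun kv => diffsOf kv.2))).Perm
      (rep_kmers.flatMap (fun kv => diffsOf kv.2)) := by
    have := mergeRounds_perm (rep_kmers.map (fun kv => diffsOf kv.2))
    simpa [List.flatMap_def] using this
  have hpw : (mergeRounds (rep_kmers.map (fun kv => diffsOf kv.2))).Pairwise (· ≤ ·) := by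
    refine mergeRounds_pairwise _ ?_
    intro ds hds
    rcases List.mem_map.1 hds with ⟨kv, _, rfl⟩
    exact diffsOf_pairwise kv.2
  have hsorted : PySem.List.sorted (rep_kmers.flatMap (fun kv => diffsOf kv.2)) (fun v => v) false =
      mergeRounds (rep_kmers.map (fun kv => diffsOf kv.2)) :=
    PySem.List.sorted_id_eq_of_perm_of_pairwise _ _ hperm hpw
  simp only [diffsOf] at hdict hflat hsorted hmapsnd ⊢
  rw [hdict, hflat, hsorted, hmapsnd]
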